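-- pv_equiv track=rewrite | github.com/JamesZwq/nclique | pivoter/proj1/autotest_out_q2/5547820_q2_autotest.py | countKcore
-- ===== SOURCE A (Python) =====
-- from collections import deque
--
-- def countKcore(subGraph, remainedVertex):
--     # Track visited nodes to avoid counting the same component multiple times
--     visited = set()
--     count = 0
--
--     # Perform BFS from each unvisited node to count connected components
--     # Each BFS traversal corresponds to one distinct k-core component
--     for u in remainedVertex:
--         if u not in visited:
--             count += 1
--             # Initialize BFS from this node
--             queue = deque()
--             queue.append(u)
--             visited.add(u)
--
--             # Standard BFS to traverse the entire connected component
--             # Only vertex in remainedVertex are considered valid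
--             while queue:
--                 v = queue.popleft()
--                 for w in subGraph[v]:
--                     if w in remainedVertex and w not in visited:
--                         visited.add(w)
--                         queue.append(w)
--
--     return count
-- ===== SOURCE B (Python) =====
-- def countKcore(subGraph, remainedVertex):
--     # Stack-based DFS with mark-on-pop (duplicates allowed on the stack)
--     # instead of A's deque BFS with mark-before-enqueue; the component
--     # count does not depend on the traversal order.
--     visited = set()
--     count = 0
--     for u in remainedVertex:
--         if u in visited:
--             continue
--         count += 1
--         stack = [u]
--         while stack:
--             v = stack.pop()
--             if v in visited:
--                 continue
--             visited.add(v)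
--             stack.extend(w for w in subGraph[v]
--                          if w in remainedVertex and w not in visited)
--     return count
-- ===== Notes on version B (the rewrite author's own statement) =====
-- stated objective: alternative
-- what changed: Replaces the deque-based BFS with mark-before-enqueue by a stack-based DFS with mark-on-pop (duplicates allowed on the stack); the component count is proved independent of the traversal order.
import Mathlib
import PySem

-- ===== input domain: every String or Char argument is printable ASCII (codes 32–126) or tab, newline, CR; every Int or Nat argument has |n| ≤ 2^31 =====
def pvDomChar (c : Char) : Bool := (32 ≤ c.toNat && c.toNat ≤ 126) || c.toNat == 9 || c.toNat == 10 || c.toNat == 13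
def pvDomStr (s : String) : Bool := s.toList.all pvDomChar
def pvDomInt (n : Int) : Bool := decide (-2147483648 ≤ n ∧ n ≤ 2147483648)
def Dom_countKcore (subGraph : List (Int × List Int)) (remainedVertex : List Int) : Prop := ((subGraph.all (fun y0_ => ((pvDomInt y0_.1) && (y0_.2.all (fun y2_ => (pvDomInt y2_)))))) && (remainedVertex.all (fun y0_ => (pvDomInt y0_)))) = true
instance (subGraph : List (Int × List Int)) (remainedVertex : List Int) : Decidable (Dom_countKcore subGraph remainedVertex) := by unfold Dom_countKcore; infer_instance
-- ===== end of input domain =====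

-- B replaces A's deque BFS (mark-before-enqueue) by a stack DFS (mark-on-pop); the proof
-- shows the component count is independent of the traversal order (equal return values).

-- ===== PORT A =====
-- number of rv-vertices not yet visited: termination measure for the BFS loop
def pvUcard (rv : List Int) (V : PySem.Set Int) : Nat :=
  (rv.toFinset.filter (fun x => x ∉ V)).card

theorem pvUcard_add_lt (rv : List Int) (V : PySem.Set Int) (w : Int)
    (hw : w ∈ rv) (hnv : w ∉ V) :
    pvUcard rv (PySem.Set.add V w) < pvUcard rv V := by
  unfold pvUcard
  apply Finset.card_lt_card
  rw [Finset.ssubset_def]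
  constructor
  · intro x hx
    simp only [Finset.mem_filter, List.mem_toFinset, PySem.Set.mem_add] at hx ⊢
    exact ⟨hx.1, fun h => hx.2 (Or.inl h)⟩
  · intro hsub
    have hw' := hsub (by
      simp only [Finset.mem_filter, List.mem_toFinset]; exact ⟨hw, hnv⟩)
    simp only [Finset.mem_filter, List.mem_toFinset, PySem.Set.mem_add] at hw'
    exact hw'.2 (Or.inr trivial)

-- the BFS inner neighbour pass never increases the measure 2·unvisited + queue-length
theorem pvFoldA_meas (rv : List Int) (ws : List Int) (p : PySem.Set Int × List Int) :
    2 * pvUcard rv (ws.foldl (fun (st : PySem.Set Int × List Int) w =>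
        if w ∈ rv ∧ w ∉ st.1 then (PySem.Set.add st.1 w, st.2 ++ [w]) else st) p).1
      + (ws.foldl (fun (st : PySem.Set Int × List Int) w =>
        if w ∈ rv ∧ w ∉ st.1 then (PySem.Set.add st.1 w, st.2 ++ [w]) else st) p).2.length
    ≤ 2 * pvUcard rv p.1 + p.2.length := by
  induction ws generalizing p with
  | nil => simp
  | cons w ws ih =>
    simp only [List.foldl_cons]
    refine le_trans (ih _) ?_
    by_cases h : w ∈ rv ∧ w ∉ p.1
    · simp only [if_pos h, List.length_append, List.length_cons, List.length_nil]
      have := pvUcard_add_lt rv p.1 w h.1 h.2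
      omega
    · simp [if_neg h]

-- A's `while queue:` BFS loop (visited is a Python set, queue the deque)
def bfsA (sg : List (Int × List Int)) (rv : List Int)
    (visited : PySem.Set Int) (queue : List Int) : PySem.Set Int :=
  match queue with
  | [] => visited
  | v :: qs =>
    -- `for w in subGraph[v]: if w in remainedVertex and w not in visited: …`
    let st := (((PySem.Dict.mk sg).get? v).getD []).foldl
      (fun (st : PySem.Set Int × List Int) w =>
        if w ∈ rv ∧ w ∉ st.1 then (PySem.Set.add st.1 w, st.2 ++ [w]) else st)
      (visited, qs)
    bfsA sg rv st.1 st.2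
termination_by 2 * pvUcard rv visited + queue.length
decreasing_by
  have h := pvFoldA_meas rv (((PySem.Dict.mk sg).get? v).getD []) (visited, qs)
  simp only [dite_eq_ite, List.length_cons] at *
  omega

def countKcore (subGraph : List (Int × List Int)) (remainedVertex : List Int) : Int :=
  (remainedVertex.foldl
    (fun (st : PySem.Set Int × Int) u =>
      if u ∈ st.1 then st
      else (bfsA subGraph remainedVertex (PySem.Set.add st.1 u) [u], st.2 + 1))
    (PySem.Set.empty, 0)).2

-- ===== PORT B =====
-- unvisited vertices among rv and the stack: first component of the DFS lex measure
def pvBcard (rv : List Int) (V : PySem.Set Int) (stack : List Int) : Nat :=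
  ((rv.toFinset ∪ stack.toFinset).filter (fun x => x ∉ V)).card

theorem pvBcard_mono (rv : List Int) (V : PySem.Set Int) (stack stack' : List Int)
    (h : ∀ x ∈ stack', x ∈ stack) : pvBcard rv V stack' ≤ pvBcard rv V stack := by
  unfold pvBcard
  apply Finset.card_le_card
  intro x hx
  simp only [Finset.mem_filter, Finset.mem_union, List.mem_toFinset] at hx ⊢
  refine ⟨?_, hx.2⟩
  rcases hx.1 with h1 | h1
  · exact Or.inl h1
  · exact Or.inr (h x h1)

theorem pvBcard_pop_lt (rv : List Int) (V : PySem.Set Int) (stack rest pushes : List Int)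
    (v : Int) (hv : v ∈ stack) (hnv : v ∉ V)
    (hrest : ∀ x ∈ rest, x ∈ stack) (hpush : ∀ x ∈ pushes, x ∈ rv) :
    pvBcard rv (PySem.Set.add V v) (rest ++ pushes) < pvBcard rv V stack := by
  unfold pvBcard
  apply Finset.card_lt_card
  rw [Finset.ssubset_def]
  constructor
  · intro x hx
    simp only [Finset.mem_filter, Finset.mem_union, List.mem_toFinset, List.mem_append,
      PySem.Set.mem_add] at hx ⊢
    obtain ⟨h1, h2⟩ := hx
    refine ⟨?_, fun h => h2 (Or.inl h)⟩
    rcases h1 with h | h | h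
    · exact Or.inl h
    · exact Or.inr (hrest x h)
    · exact Or.inl (hpush x h)
  · intro hsub
    have hv' := hsub (by
      simp only [Finset.mem_filter, Finset.mem_union, List.mem_toFinset]
      exact ⟨Or.inr hv, hnv⟩)
    simp only [Finset.mem_filter, PySem.Set.mem_add] at hv'
    exact hv'.2 (Or.inr trivial)

-- B's `while stack:` DFS loop: pop from the end, skip visited, mark, push unvisited rv-neighbours
def dfsB (sg : List (Int × List Int)) (rv : List Int)
    (visited : PySem.Set Int) (stack : List Int) : PySem.Set Int :=
  if hst : stack = [] then visited
  else
    let v := stack.getLast hst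
    let rest := stack.dropLast
    if v ∈ visited then dfsB sg rv visited rest
    else
      let visited' := PySem.Set.add visited v
      dfsB sg rv visited'
        (rest ++ (((PySem.Dict.mk sg).get? v).getD []).filter
          (fun w => decide (w ∈ rv ∧ w ∉ visited')))
termination_by (pvBcard rv visited stack, stack.length)
decreasing_by
  · have hle : pvBcard rv visited stack.dropLast ≤ pvBcard rv visited stack :=
      pvBcard_mono rv visited stack stack.dropLast (fun x hx => List.mem_of_mem_dropLast hx)
    rcases lt_or_eq_of_le hle with h | h
    · exact Prod.Lex.left _ _ h
    · rw [h]
      exact Prod.Lex.right _ (by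
        have h1 : stack.dropLast.length = stack.length - 1 := List.length_dropLast
        have h2 : stack.length ≠ 0 := fun h0 => hst (List.eq_nil_of_length_eq_zero h0)
        omega)
  · apply Prod.Lex.left
    apply pvBcard_pop_lt rv visited stack stack.dropLast _ (stack.getLast hst)
      (List.getLast_mem hst) (by assumption)
      (fun x hx => List.mem_of_mem_dropLast hx)
    intro x hx
    have := List.of_mem_filter hx
    simp at this
    exact this.1

def countKcore_alt (subGraph : List (Int × List Int)) (remainedVertex : List Int) : Int :=
  (remainedVertex.foldl
    (fun (st : PySem.Set Int × Int) u =>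
      if u ∈ st.1 then st
      else (dfsB subGraph remainedVertex st.1 [u], st.2 + 1))
    (PySem.Set.empty, 0)).2

-- ===== PRECONDITION & SPEC =====
-- Pre_ excludes exactly the inputs on which A raises KeyError: some vertex of
-- remainedVertex is not a key of subGraph (B raises KeyError there too).
def Pre_countKcore (subGraph : List (Int × List Int)) (remainedVertex : List Int) : Prop :=
  ∀ u ∈ remainedVertex, ((PySem.Dict.mk subGraph).get? u).isSome = true
instance (subGraph : List (Int × List Int)) (remainedVertex : List Int) :
    Decidable (Pre_countKcore subGraph remainedVertex) := by
  unfold Pre_countKcore; infer_instance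

def pvWitness_countKcore : (List (Int × List Int)) × List Int :=
  ([(0, [1]), (1, [0]), (2, [])], [0, 1, 2])

def Spec_countKcore (subGraph : List (Int × List Int)) (remainedVertex : List Int) (out : Int) : Prop := out = countKcore_alt subGraph remainedVertex
instance (subGraph : List (Int × List Int)) (remainedVertex : List Int) (out : Int) : Decidable (Spec_countKcore subGraph remainedVertex out) := by unfold Spec_countKcore; infer_instance

-- ===== CLAIM (what is proved, stated in full; the proofs are below) =====
def Claim_equal_countKcore : Prop := ∀ (subGraph : List (Int × List Int)) (remainedVertex : List Int), Dom_countKcore subGraph remainedVertex → Pre_countKcore subGraph remainedVertex → Spec_countKcore subGraph remainedVertex (countKcore subGraph remainedVertex)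

-- ===== LEMMAS AND PROOFS =====

-- adjacency list of v (sg is a Python dict; [] is never read under Pre_)
def pvAdj (sg : List (Int × List Int)) (v : Int) : List Int :=
  ((PySem.Dict.mk sg).get? v).getD []

-- reachability from u along edges of sg restricted to rv
inductive pvReach (sg : List (Int × List Int)) (rv : List Int) : Int → Int → Prop
  | refl (u : Int) : pvReach sg rv u u
  | tail {u v w : Int} : pvReach sg rv u v → w ∈ pvAdj sg v → w ∈ rv → pvReach sg rv u w

def pvClosed (sg : List (Int × List Int)) (rv : List Int) (V : PySem.Set Int) : Prop :=
  ∀ v ∈ V, ∀ w, w ∈ pvAdj sg v → w ∈ rv → w ∈ V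


-- the body of A's neighbour loop, named for the proofs
def pvStepA (rv : List Int) (st : PySem.Set Int × List Int) (w : Int) :
    PySem.Set Int × List Int :=
  if w ∈ rv ∧ w ∉ st.1 then (PySem.Set.add st.1 w, st.2 ++ [w]) else st

theorem pvStepA_def (rv : List Int) :
    (fun (st : PySem.Set Int × List Int) (w : Int) =>
      if w ∈ rv ∧ w ∉ st.1 then (PySem.Set.add st.1 w, st.2 ++ [w]) else st) = pvStepA rv := rfl

theorem foldA_vis_mono (rv : List Int) (ws : List Int) (p : PySem.Set Int × List Int) :
    ∀ x ∈ p.1, x ∈ (ws.foldl (pvStepA rv) p).1 := by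
  induction ws generalizing p with
  | nil => intro x hx; simpa using hx
  | cons w ws ih =>
    intro x hx
    simp only [List.foldl_cons]
    apply ih
    unfold pvStepA
    by_cases h : w ∈ rv ∧ w ∉ p.1
    · simp only [if_pos h, PySem.Set.mem_add]; exact Or.inl hx
    · simpa [if_neg h] using hx

theorem foldA_q_mono (rv : List Int) (ws : List Int) (p : PySem.Set Int × List Int) :
    ∀ x ∈ p.2, x ∈ (ws.foldl (pvStepA rv) p).2 := by
  induction ws generalizing p with
  | nil => intro x hx; simpa using hx
  | cons w ws ih =>
    intro x hx
    simp only [List.foldl_cons]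
    apply ih
    unfold pvStepA
    by_cases h : w ∈ rv ∧ w ∉ p.1
    · simp only [if_pos h, List.mem_append]; exact Or.inl hx
    · simpa [if_neg h] using hx

theorem foldA_cover (rv : List Int) (ws : List Int) (p : PySem.Set Int × List Int) :
    ∀ w ∈ ws, w ∈ rv → w ∈ (ws.foldl (pvStepA rv) p).1 := by
  induction ws generalizing p with
  | nil => intro w hw; cases hw
  | cons a ws ih =>
    intro w hw hrv
    simp only [List.foldl_cons]
    rcases List.mem_cons.1 hw with rfl | hw'
    · apply foldA_vis_mono
      unfold pvStepA
      by_cases h : w ∈ rv ∧ w ∉ p.1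
      · simp [if_pos h, PySem.Set.mem_add]
      · have hwp : w ∈ p.1 := by by_contra hc; exact h ⟨hrv, hc⟩
        simpa [if_neg h] using hwp
    · exact ih _ w hw' hrv

theorem foldA_vis_sub (rv : List Int) (ws : List Int) (p : PySem.Set Int × List Int) :
    ∀ x ∈ (ws.foldl (pvStepA rv) p).1,
      x ∈ p.1 ∨ (x ∈ ws ∧ x ∈ rv ∧ x ∈ (ws.foldl (pvStepA rv) p).2) := by
  induction ws generalizing p with
  | nil => intro x hx; exact Or.inl (by simpa using hx)
  | cons w ws ih =>
    intro x hx
    simp only [List.foldl_cons] at hx ⊢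
    rcases ih (pvStepA rv p w) x hx with hx' | ⟨h1, h2, h3⟩
    · by_cases h : w ∈ rv ∧ w ∉ p.1
      · simp only [pvStepA, if_pos h, PySem.Set.mem_add] at hx'
        rcases hx' with hx' | rfl
        · exact Or.inl hx'
        · refine Or.inr ⟨List.mem_cons_self, h.1, ?_⟩
          apply foldA_q_mono
          simp only [pvStepA, if_pos h, List.mem_append]
          exact Or.inr (List.mem_singleton.2 rfl)
      · simp only [pvStepA, if_neg h] at hx'
        exact Or.inl hx'
    · exact Or.inr ⟨List.mem_cons_of_mem _ h1, h2, h3⟩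

theorem foldA_q_sub (rv : List Int) (ws : List Int) (p : PySem.Set Int × List Int) :
    ∀ x ∈ (ws.foldl (pvStepA rv) p).2, x ∈ p.2 ∨ (x ∈ ws ∧ x ∈ rv) := by
  induction ws generalizing p with
  | nil => intro x hx; exact Or.inl (by simpa using hx)
  | cons w ws ih =>
    intro x hx
    simp only [List.foldl_cons] at hx
    rcases ih (pvStepA rv p w) x hx with hx' | ⟨h1, h2⟩
    · by_cases h : w ∈ rv ∧ w ∉ p.1
      · simp only [pvStepA, if_pos h, List.mem_append] at hx'
        rcases hx' with hx' | hx'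
        · exact Or.inl hx'
        · exact Or.inr ⟨by simp [List.mem_singleton.1 hx'], by
            rw [List.mem_singleton.1 hx']; exact h.1⟩
      · simp only [pvStepA, if_neg h] at hx'
        exact Or.inl hx'
    · exact Or.inr ⟨List.mem_cons_of_mem _ h1, h2⟩


theorem bfsA_mono (sg : List (Int × List Int)) (rv : List Int) :
    ∀ (V : PySem.Set Int) (q : List Int), ∀ x ∈ V, x ∈ bfsA sg rv V q := by
  intro V q
  induction V, q using bfsA.induct sg rv with
  | case1 visited => intro x hx; simpa [bfsA] using hx
  | case2 visited v qs st ih =>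
    intro x hx
    rw [bfsA]
    simp only [pvStepA_def]
    exact ih x (foldA_vis_mono rv _ (visited, qs) x hx)

theorem bfsA_upper (sg : List (Int × List Int)) (rv : List Int) (P : Int → Prop)
    (hPE : ∀ v w, P v → w ∈ pvAdj sg v → w ∈ rv → P w) :
    ∀ (V : PySem.Set Int) (q : List Int), (∀ x ∈ V, P x) → (∀ x ∈ q, P x) →
      ∀ x ∈ bfsA sg rv V q, P x := by
  intro V q
  induction V, q using bfsA.induct sg rv with
  | case1 visited => intro h1 _ x hx; exact h1 x (by simpa [bfsA] using hx)
  | case2 visited v qs st ih =>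
    intro h1 h2 x hx
    rw [bfsA] at hx
    simp only [pvStepA_def] at hx
    refine ih ?_ ?_ x hx
    · intro y hy
      rcases foldA_vis_sub rv _ (visited, qs) y hy with hy' | ⟨hws, hrv, _⟩
      · exact h1 y hy'
      · exact hPE v y (h2 v List.mem_cons_self) hws hrv
    · intro y hy
      rcases foldA_q_sub rv _ (visited, qs) y hy with hy' | ⟨hws, hrv⟩
      · exact h2 y (List.mem_cons_of_mem _ hy')
      · exact hPE v y (h2 v List.mem_cons_self) hws hrv

theorem bfsA_closed (sg : List (Int × List Int)) (rv : List Int) :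
    ∀ (V : PySem.Set Int) (q : List Int),
      (∀ v ∈ V, v ∈ q ∨ ∀ w, w ∈ pvAdj sg v → w ∈ rv → w ∈ V) →
      pvClosed sg rv (bfsA sg rv V q) := by
  intro V q
  induction V, q using bfsA.induct sg rv with
  | case1 visited =>
    intro h v hv w hw hrv
    rcases h v (by simpa [bfsA] using hv) with hq | hcl
    · cases hq
    · simpa [bfsA] using hcl w hw hrv
  | case2 visited v qs st ih =>
    intro h
    rw [bfsA]
    simp only [pvStepA_def]
    refine ih ?_
    intro v' hv'
    rcases foldA_vis_sub rv _ (visited, qs) v' hv' with hold | ⟨_, _, hq⟩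
    · rcases h v' hold with hq | hcl
      · rcases List.mem_cons.1 hq with rfl | hqs
        · right
          intro w hw hwrv
          exact foldA_cover rv _ (visited, qs) w hw hwrv
        · exact Or.inl (foldA_q_mono rv _ (visited, qs) v' hqs)
      · right
        intro w hw hwrv
        exact foldA_vis_mono rv _ (visited, qs) w (hcl w hw hwrv)
    · exact Or.inl hq

theorem bfsA_char (sg : List (Int × List Int)) (rv : List Int) (V : PySem.Set Int) (u : Int)
    (hC : pvClosed sg rv V) :
    ∀ x, x ∈ bfsA sg rv (PySem.Set.add V u) [u] ↔ (x ∈ V ∨ pvReach sg rv u x) := by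
  intro x
  constructor
  · intro hx
    refine bfsA_upper sg rv (fun y => y ∈ V ∨ pvReach sg rv u y) ?_ _ _ ?_ ?_ x hx
    · intro a b hPa hb hbrv
      rcases hPa with hPa | hPa
      · exact Or.inl (hC a hPa b hb hbrv)
      · exact Or.inr (pvReach.tail hPa hb hbrv)
    · intro y hy
      rcases (PySem.Set.mem_add _ _ _).1 hy with hy | rfl
      · exact Or.inl hy
      · exact Or.inr (pvReach.refl _)
    · intro y hy
      rw [List.mem_singleton.1 hy]
      exact Or.inr (pvReach.refl _)
  · have hclosed : pvClosed sg rv (bfsA sg rv (PySem.Set.add V u) [u]) := by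
      apply bfsA_closed
      intro v' hv'
      rcases (PySem.Set.mem_add _ _ _).1 hv' with hv' | rfl
      · right
        intro w hw hwrv
        exact (PySem.Set.mem_add _ _ _).2 (Or.inl (hC v' hv' w hw hwrv))
      · exact Or.inl (List.mem_singleton.2 rfl)
    have hu : u ∈ bfsA sg rv (PySem.Set.add V u) [u] :=
      bfsA_mono sg rv _ _ u ((PySem.Set.mem_add _ _ _).2 (Or.inr rfl))
    rintro (hx | hx)
    · exact bfsA_mono sg rv _ _ x ((PySem.Set.mem_add _ _ _).2 (Or.inl hx))
    · induction hx with
      | refl => exact hu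
      | tail _ hw hwrv ihm => exact hclosed _ ihm _ hw hwrv


theorem pvStack_decomp (stack : List Int) (h : stack ≠ []) (x : Int) (hx : x ∈ stack) :
    x ∈ stack.dropLast ∨ x = stack.getLast h := by
  have hx' : x ∈ stack.dropLast ++ [stack.getLast h] := by
    rw [List.dropLast_append_getLast h]; exact hx
  rcases List.mem_append.1 hx' with h1 | h1
  · exact Or.inl h1
  · exact Or.inr (List.mem_singleton.1 h1)

theorem dfsB_unfold_nil (sg : List (Int × List Int)) (rv : List Int) (visited : PySem.Set Int) :
    dfsB sg rv visited [] = visited := by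
  rw [dfsB]
  simp

theorem dfsB_unfold_skip (sg : List (Int × List Int)) (rv : List Int) (visited : PySem.Set Int)
    (stack : List Int) (h : stack ≠ []) (hv : stack.getLast h ∈ visited) :
    dfsB sg rv visited stack = dfsB sg rv visited stack.dropLast := by
  conv_lhs => rw [dfsB]
  simp only [dif_neg h, if_pos hv]

theorem dfsB_unfold_add (sg : List (Int × List Int)) (rv : List Int) (visited : PySem.Set Int)
    (stack : List Int) (h : stack ≠ []) (hv : stack.getLast h ∉ visited) :
    dfsB sg rv visited stack = dfsB sg rv (PySem.Set.add visited (stack.getLast h))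
      (stack.dropLast ++ (((PySem.Dict.mk sg).get? (stack.getLast h)).getD []).filter
        (fun w => decide (w ∈ rv ∧ w ∉ PySem.Set.add visited (stack.getLast h)))) := by
  conv_lhs => rw [dfsB]
  simp only [dif_neg h, if_neg hv]

theorem dfsB_mono (sg : List (Int × List Int)) (rv : List Int) :
    ∀ (V : PySem.Set Int) (s : List Int), ∀ x ∈ V, x ∈ dfsB sg rv V s := by
  intro V s
  induction V, s using dfsB.induct sg rv with
  | case1 visited => intro x hx; rw [dfsB_unfold_nil]; exact hx
  | case2 visited stack h v rest hv ih =>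
    intro x hx
    rw [dfsB_unfold_skip sg rv visited stack h hv]
    exact ih x hx
  | case3 visited stack h v rest hv visited' ih =>
    intro x hx
    rw [dfsB_unfold_add sg rv visited stack h hv]
    exact ih x ((PySem.Set.mem_add _ _ _).2 (Or.inl hx))

theorem dfsB_stack (sg : List (Int × List Int)) (rv : List Int) :
    ∀ (V : PySem.Set Int) (s : List Int), ∀ x ∈ s, x ∈ dfsB sg rv V s := by
  intro V s
  induction V, s using dfsB.induct sg rv with
  | case1 visited => intro x hx; cases hx
  | case2 visited stack h v rest hv ih =>
    intro x hx
    rw [dfsB_unfold_skip sg rv visited stack h hv]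
    rcases pvStack_decomp stack h x hx with h1 | rfl
    · exact ih x h1
    · exact dfsB_mono sg rv _ _ _ hv
  | case3 visited stack h v rest hv visited' ih =>
    intro x hx
    rw [dfsB_unfold_add sg rv visited stack h hv]
    rcases pvStack_decomp stack h x hx with h1 | rfl
    · exact ih x (List.mem_append.2 (Or.inl h1))
    · exact dfsB_mono sg rv _ _ _ ((PySem.Set.mem_add _ _ _).2 (Or.inr rfl))

theorem dfsB_upper (sg : List (Int × List Int)) (rv : List Int) (P : Int → Prop)
    (hPE : ∀ v w, P v → w ∈ pvAdj sg v → w ∈ rv → P w) :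
    ∀ (V : PySem.Set Int) (s : List Int), (∀ x ∈ V, P x) → (∀ x ∈ s, P x) →
      ∀ x ∈ dfsB sg rv V s, P x := by
  intro V s
  induction V, s using dfsB.induct sg rv with
  | case1 visited =>
    intro h1 _ x hx
    rw [dfsB_unfold_nil] at hx
    exact h1 x hx
  | case2 visited stack h v rest hv ih =>
    intro h1 h2 x hx
    rw [dfsB_unfold_skip sg rv visited stack h hv] at hx
    exact ih h1 (fun y hy => h2 y (List.mem_of_mem_dropLast hy)) x hx
  | case3 visited stack h v rest hv visited' ih =>
    intro h1 h2 x hx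
    rw [dfsB_unfold_add sg rv visited stack h hv] at hx
    refine ih ?_ ?_ x hx
    · intro y hy
      rcases (PySem.Set.mem_add _ _ _).1 hy with hy' | rfl
      · exact h1 y hy'
      · exact h2 _ (List.getLast_mem h)
    · intro y hy
      rcases List.mem_append.1 hy with hy' | hy'
      · exact h2 y (List.mem_of_mem_dropLast hy')
      · have hm := List.mem_filter.1 hy'
        have hc := of_decide_eq_true hm.2
        exact hPE _ y (h2 _ (List.getLast_mem h)) hm.1 hc.1

theorem dfsB_closed (sg : List (Int × List Int)) (rv : List Int) :
    ∀ (V : PySem.Set Int) (s : List Int),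
      (∀ v ∈ V, ∀ w, w ∈ pvAdj sg v → w ∈ rv → (w ∈ V ∨ w ∈ s)) →
      pvClosed sg rv (dfsB sg rv V s) := by
  intro V s
  induction V, s using dfsB.induct sg rv with
  | case1 visited =>
    intro h v hv w hw hrv
    rw [dfsB_unfold_nil] at hv ⊢
    rcases h v hv w hw hrv with hV | hs
    · exact hV
    · cases hs
  | case2 visited stack h v rest hv ih =>
    intro hinv
    rw [dfsB_unfold_skip sg rv visited stack h hv]
    refine ih ?_
    intro v' hv' w hw hrv
    rcases hinv v' hv' w hw hrv with hV | hs
    · exact Or.inl hV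
    · rcases pvStack_decomp stack h w hs with h1 | rfl
      · exact Or.inr h1
      · exact Or.inl hv
  | case3 visited stack h v rest hv visited' ih =>
    intro hinv
    rw [dfsB_unfold_add sg rv visited stack h hv]
    refine ih ?_
    intro v' hv' w hw hrv
    rcases (PySem.Set.mem_add _ _ _).1 hv' with hv'' | rfl
    · rcases hinv v' hv'' w hw hrv with hV | hs
      · exact Or.inl ((PySem.Set.mem_add _ _ _).2 (Or.inl hV))
      · rcases pvStack_decomp stack h w hs with h1 | rfl
        · exact Or.inr (List.mem_append.2 (Or.inl h1))
        · exact Or.inl ((PySem.Set.mem_add _ _ _).2 (Or.inr rfl))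
    · by_cases hwv : w ∈ PySem.Set.add visited (stack.getLast h)
      · exact Or.inl hwv
      · refine Or.inr (List.mem_append.2 (Or.inr ?_))
        exact List.mem_filter.2 ⟨hw, decide_eq_true ⟨hrv, hwv⟩⟩

theorem dfsB_char (sg : List (Int × List Int)) (rv : List Int) (V : PySem.Set Int) (u : Int)
    (hC : pvClosed sg rv V) :
    ∀ x, x ∈ dfsB sg rv V [u] ↔ (x ∈ V ∨ pvReach sg rv u x) := by
  intro x
  constructor
  · intro hx
    refine dfsB_upper sg rv (fun y => y ∈ V ∨ pvReach sg rv u y) ?_ _ _ ?_ ?_ x hx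
    · intro a b hPa hb hbrv
      rcases hPa with hPa | hPa
      · exact Or.inl (hC a hPa b hb hbrv)
      · exact Or.inr (pvReach.tail hPa hb hbrv)
    · intro y hy
      exact Or.inl hy
    · intro y hy
      rw [List.mem_singleton.1 hy]
      exact Or.inr (pvReach.refl _)
  · have hclosed : pvClosed sg rv (dfsB sg rv V [u]) := by
      apply dfsB_closed
      intro v' hv' w hw hwrv
      exact Or.inl (hC v' hv' w hw hwrv)
    have hu : u ∈ dfsB sg rv V [u] :=
      dfsB_stack sg rv _ _ u (List.mem_singleton.2 rfl)
    rintro (hx | hx)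
    · exact dfsB_mono sg rv _ _ x hx
    · induction hx with
      | refl => exact hu
      | tail _ hw hwrv ihm => exact hclosed _ ihm _ hw hwrv


theorem pvClosed_transfer (sg : List (Int × List Int)) (rv : List Int)
    (VA VB : PySem.Set Int) (h : ∀ x, x ∈ VA ↔ x ∈ VB) (hC : pvClosed sg rv VA) :
    pvClosed sg rv VB :=
  fun v hv w hw hrv => (h w).1 (hC v ((h v).2 hv) w hw hrv)

theorem pvOuter (sg : List (Int × List Int)) (rv : List Int) :
    ∀ (l : List Int) (sA sB : PySem.Set Int × Int),
    (∀ x, x ∈ sA.1 ↔ x ∈ sB.1) → sA.2 = sB.2 → pvClosed sg rv sA.1 →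
    (l.foldl (fun (st : PySem.Set Int × Int) u =>
        if u ∈ st.1 then st else (bfsA sg rv (PySem.Set.add st.1 u) [u], st.2 + 1)) sA).2
    = (l.foldl (fun (st : PySem.Set Int × Int) u =>
        if u ∈ st.1 then st else (dfsB sg rv st.1 [u], st.2 + 1)) sB).2 := by
  intro l
  induction l with
  | nil => intro sA sB _ h2 _; simpa using h2
  | cons u l ih =>
    intro sA sB h1 h2 hC
    simp only [List.foldl_cons]
    by_cases hu : u ∈ sA.1
    · rw [if_pos hu, if_pos ((h1 u).1 hu)]
      exact ih sA sB h1 h2 hC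
    · rw [if_neg hu, if_neg (fun hb => hu ((h1 u).2 hb))]
      have hCB : pvClosed sg rv sB.1 := pvClosed_transfer sg rv sA.1 sB.1 h1 hC
      refine ih _ _ ?_ ?_ ?_
      · intro x
        rw [show ((bfsA sg rv (PySem.Set.add sA.1 u) [u], sA.2 + 1) :
              PySem.Set Int × Int).1 = bfsA sg rv (PySem.Set.add sA.1 u) [u] from rfl,
            show ((dfsB sg rv sB.1 [u], sB.2 + 1) : PySem.Set Int × Int).1
              = dfsB sg rv sB.1 [u] from rfl,
            bfsA_char sg rv sA.1 u hC x, dfsB_char sg rv sB.1 u hCB x]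
        exact or_congr (h1 x) Iff.rfl
      · simp [h2]
      · intro v hv w hw hrv
        rw [show ((bfsA sg rv (PySem.Set.add sA.1 u) [u], sA.2 + 1) :
              PySem.Set Int × Int).1 = bfsA sg rv (PySem.Set.add sA.1 u) [u] from rfl] at hv ⊢
        rw [bfsA_char sg rv sA.1 u hC] at hv ⊢
        rcases hv with hv | hv
        · exact Or.inl (hC v hv w hw hrv)
        · exact Or.inr (pvReach.tail hv hw hrv)

-- ===== VERDICT (by name: the statement is the Claim_ definition above) =====
theorem countKcore_spec : Claim_equal_countKcore := by
  intro subGraph remainedVertex _ _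
  unfold Spec_countKcore countKcore countKcore_alt
  exact pvOuter subGraph remainedVertex remainedVertex (PySem.Set.empty, 0) (PySem.Set.empty, 0)
    (fun x => Iff.rfl) rfl (fun v hv => absurd hv List.not_mem_nil)
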